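-- pv_equiv track=rewrite | github.com/Journey-R/python_example | find_num.py | solution_book
-- ===== SOURCE A (Python) =====
-- def solution_book(input_str):
--     answer = ""
--     for i in range(10):
--         if str(i) in input_str:
--             pass
--         else:
--             answer = str(i)
--             break
--
--     return answer
-- ===== SOURCE B (Python) =====
-- def solution_book(input_str):
--     missing = set('0123456789') - set(input_str)
--     return min(missing) if missing else ''
-- ===== Notes on version B (the rewrite author's own statement) =====
-- stated objective: simpler
-- what changed: Replaces the explicit 0-9 loop with break by a set difference (digits minus the characters of the input) followed by a single min, relying on digit characters ordering numerically.
import Mathlib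
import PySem

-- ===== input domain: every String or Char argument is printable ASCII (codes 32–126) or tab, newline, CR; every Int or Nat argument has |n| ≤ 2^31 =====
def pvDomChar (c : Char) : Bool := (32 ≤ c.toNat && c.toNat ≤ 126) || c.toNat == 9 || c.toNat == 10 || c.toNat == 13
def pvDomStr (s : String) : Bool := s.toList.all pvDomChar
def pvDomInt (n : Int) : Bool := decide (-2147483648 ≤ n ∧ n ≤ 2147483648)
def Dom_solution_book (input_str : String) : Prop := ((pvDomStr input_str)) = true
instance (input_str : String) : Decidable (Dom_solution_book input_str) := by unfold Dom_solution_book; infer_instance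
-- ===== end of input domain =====

-- B replaces A's explicit 0-9 loop with break by one set difference plus a single min (objective: simpler).

-- ===== PORT A =====
-- the 'for i in range(10)' loop with its break; 'answer' is the accumulator, set only at the break
def solutionBookLoop (input_str : String) (answer : String) : List Int → String
  | [] => answer
  | i :: rest =>
      if PySem.Str.isIn (PySem.Int.toStr i) input_str then
        solutionBookLoop input_str answer rest
      else
        PySem.Int.toStr i

def solution_book (input_str : String) : String :=
  solutionBookLoop input_str "" (PySem.List.pyRange 0 10 1)

-- ===== PORT B =====
def solution_book_alt (input_str : String) : String :=
  let missing := PySem.Set.diff (PySem.Set.ofList "0123456789".toList)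
                                (PySem.Set.ofList input_str.toList)
  match PySem.List.min? missing (fun c => c) with
  | some c => String.ofList [c]
  | none => ""

-- ===== PRECONDITION & SPEC =====
def Spec_solution_book (input_str : String) (out : String) : Prop := out = solution_book_alt input_str
instance (input_str : String) (out : String) : Decidable (Spec_solution_book input_str out) := by unfold Spec_solution_book; infer_instance

-- ===== CLAIM (what is proved, stated in full; the proofs are below) =====
def Claim_equal_solution_book : Prop := ∀ (input_str : String), Dom_solution_book input_str → Spec_solution_book input_str (solution_book input_str)

-- ===== LEMMAS AND PROOFS =====

theorem pv_isIn_single (c : Char) (s : String) :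
    PySem.Str.isIn (String.ofList [c]) s = decide (c ∈ s.toList) := by
  by_cases h : c ∈ s.toList
  · simp only [h, decide_true]
    rw [PySem.Str.isIn_iff_infix]
    obtain ⟨t1, t2, ht⟩ := List.append_of_mem h
    exact ⟨t1, t2, by simp [ht]⟩
  · simp only [h, decide_false]
    rw [Bool.eq_false_iff]
    intro hT
    rw [PySem.Str.isIn_iff_infix] at hT
    simp only [String.toList_ofList] at hT
    exact h (hT.subset (by simp))

theorem pv_foldl_min_eq {α : Type} [LinearOrder α] (a : α) :
    ∀ t : List α, (∀ y ∈ t, a ≤ y) → t.foldl min a = a := by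
  intro t
  induction t with
  | nil => intro _; rfl
  | cons x t ih =>
      intro h
      have : min a x = a := min_eq_left (h x (by simp))
      simp only [List.foldl_cons, this]
      exact ih (fun y hy => h y (by simp [hy]))

theorem pv_min?_cons_of_le (c : Char) (rest : List Char) (h : ∀ y ∈ rest, c ≤ y) :
    PySem.List.min? (c :: rest) (fun y => y) = some c := by
  rw [PySem.List.min?_id_cons, pv_foldl_min_eq c rest h]

-- ===== VERDICT (by name: the statement is the Claim_ definition above) =====
theorem solution_book_spec : Claim_equal_solution_book := by
  intro s _
  show solution_book s = solution_book_alt s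
  unfold solution_book solution_book_alt
  rw [show PySem.List.pyRange 0 10 1 = [0,1,2,3,4,5,6,7,8,9] from by decide]
  rw [show PySem.Set.ofList "0123456789".toList = "0123456789".toList from rfl]
  have hc : ∀ c : Char, PySem.Set.contains (PySem.Set.ofList s.toList) c = decide (c ∈ s.toList) := by
    intro c
    by_cases h : c ∈ s.toList
    · simp [PySem.Set.mem_ofList, h]
    · simp [PySem.Set.mem_ofList, h]
  have ht : ∀ (i : Int) (c : Char), PySem.Int.toStr i = String.ofList [c] →
      PySem.Str.isIn (PySem.Int.toStr i) s = decide (c ∈ s.toList) := by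
    intro i c hi; rw [hi, pv_isIn_single]
  simp only [PySem.Set.diff, hc]
  simp only [solutionBookLoop, ht 0 '0' rfl, ht 1 '1' rfl, ht 2 '2' rfl, ht 3 '3' rfl,
    ht 4 '4' rfl, ht 5 '5' rfl, ht 6 '6' rfl, ht 7 '7' rfl, ht 8 '8' rfl, ht 9 '9' rfl]
  rw [show "0123456789".toList = ['0','1','2','3','4','5','6','7','8','9'] from rfl]
  by_cases h0 : '0' ∈ s.toList
  · by_cases h1 : '1' ∈ s.toList
    · by_cases h2 : '2' ∈ s.toList
      · by_cases h3 : '3' ∈ s.toList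
        · by_cases h4 : '4' ∈ s.toList
          · by_cases h5 : '5' ∈ s.toList
            · by_cases h6 : '6' ∈ s.toList
              · by_cases h7 : '7' ∈ s.toList
                · by_cases h8 : '8' ∈ s.toList
                  · by_cases h9 : '9' ∈ s.toList
                    · simp only [h0, h1, h2, h3, h4, h5, h6, h7, h8, h9, decide_true, decide_false, Bool.not_true, Bool.not_false, Bool.false_eq_true, if_true, if_false, ite_true, ite_false]
                      rw [List.filter_cons_of_neg (by simp [h0])]
                      rw [List.filter_cons_of_neg (by simp [h1])]
                      rw [List.filter_cons_of_neg (by simp [h2])]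
                      rw [List.filter_cons_of_neg (by simp [h3])]
                      rw [List.filter_cons_of_neg (by simp [h4])]
                      rw [List.filter_cons_of_neg (by simp [h5])]
                      rw [List.filter_cons_of_neg (by simp [h6])]
                      rw [List.filter_cons_of_neg (by simp [h7])]
                      rw [List.filter_cons_of_neg (by simp [h8])]
                      rw [List.filter_cons_of_neg (by simp [h9])]
                      rfl
                    · simp only [h0, h1, h2, h3, h4, h5, h6, h7, h8, h9, decide_true, decide_false, Bool.not_true, Bool.not_false, Bool.false_eq_true, if_true, if_false, ite_true, ite_false]
                      rw [List.filter_cons_of_neg (by simp [h0])]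
                      rw [List.filter_cons_of_neg (by simp [h1])]
                      rw [List.filter_cons_of_neg (by simp [h2])]
                      rw [List.filter_cons_of_neg (by simp [h3])]
                      rw [List.filter_cons_of_neg (by simp [h4])]
                      rw [List.filter_cons_of_neg (by simp [h5])]
                      rw [List.filter_cons_of_neg (by simp [h6])]
                      rw [List.filter_cons_of_neg (by simp [h7])]
                      rw [List.filter_cons_of_neg (by simp [h8])]
                      rw [List.filter_cons_of_pos (by simp [h9])]
                      rw [pv_min?_cons_of_le _ _ (by intro y hy; have hm := List.mem_of_mem_filter hy; fin_cases hm <;> decide)]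
                      rfl
                  · simp only [h0, h1, h2, h3, h4, h5, h6, h7, h8, decide_true, decide_false, Bool.not_true, Bool.not_false, Bool.false_eq_true, if_true, if_false, ite_true, ite_false]
                    rw [List.filter_cons_of_neg (by simp [h0])]
                    rw [List.filter_cons_of_neg (by simp [h1])]
                    rw [List.filter_cons_of_neg (by simp [h2])]
                    rw [List.filter_cons_of_neg (by simp [h3])]
                    rw [List.filter_cons_of_neg (by simp [h4])]
                    rw [List.filter_cons_of_neg (by simp [h5])]
                    rw [List.filter_cons_of_neg (by simp [h6])]
                    rw [List.filter_cons_of_neg (by simp [h7])]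
                    rw [List.filter_cons_of_pos (by simp [h8])]
                    rw [pv_min?_cons_of_le _ _ (by intro y hy; have hm := List.mem_of_mem_filter hy; fin_cases hm <;> decide)]
                    rfl
                · simp only [h0, h1, h2, h3, h4, h5, h6, h7, decide_true, decide_false, Bool.not_true, Bool.not_false, Bool.false_eq_true, if_true, if_false, ite_true, ite_false]
                  rw [List.filter_cons_of_neg (by simp [h0])]
                  rw [List.filter_cons_of_neg (by simp [h1])]
                  rw [List.filter_cons_of_neg (by simp [h2])]
                  rw [List.filter_cons_of_neg (by simp [h3])]
                  rw [List.filter_cons_of_neg (by simp [h4])]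
                  rw [List.filter_cons_of_neg (by simp [h5])]
                  rw [List.filter_cons_of_neg (by simp [h6])]
                  rw [List.filter_cons_of_pos (by simp [h7])]
                  rw [pv_min?_cons_of_le _ _ (by intro y hy; have hm := List.mem_of_mem_filter hy; fin_cases hm <;> decide)]
                  rfl
              · simp only [h0, h1, h2, h3, h4, h5, h6, decide_true, decide_false, Bool.not_true, Bool.not_false, Bool.false_eq_true, if_true, if_false, ite_true, ite_false]
                rw [List.filter_cons_of_neg (by simp [h0])]
                rw [List.filter_cons_of_neg (by simp [h1])]
                rw [List.filter_cons_of_neg (by simp [h2])]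
                rw [List.filter_cons_of_neg (by simp [h3])]
                rw [List.filter_cons_of_neg (by simp [h4])]
                rw [List.filter_cons_of_neg (by simp [h5])]
                rw [List.filter_cons_of_pos (by simp [h6])]
                rw [pv_min?_cons_of_le _ _ (by intro y hy; have hm := List.mem_of_mem_filter hy; fin_cases hm <;> decide)]
                rfl
            · simp only [h0, h1, h2, h3, h4, h5, decide_true, decide_false, Bool.not_true, Bool.not_false, Bool.false_eq_true, if_true, if_false, ite_true, ite_false]
              rw [List.filter_cons_of_neg (by simp [h0])]
              rw [List.filter_cons_of_neg (by simp [h1])]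
              rw [List.filter_cons_of_neg (by simp [h2])]
              rw [List.filter_cons_of_neg (by simp [h3])]
              rw [List.filter_cons_of_neg (by simp [h4])]
              rw [List.filter_cons_of_pos (by simp [h5])]
              rw [pv_min?_cons_of_le _ _ (by intro y hy; have hm := List.mem_of_mem_filter hy; fin_cases hm <;> decide)]
              rfl
          · simp only [h0, h1, h2, h3, h4, decide_true, decide_false, Bool.not_true, Bool.not_false, Bool.false_eq_true, if_true, if_false, ite_true, ite_false]
            rw [List.filter_cons_of_neg (by simp [h0])]
            rw [List.filter_cons_of_neg (by simp [h1])]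
            rw [List.filter_cons_of_neg (by simp [h2])]
            rw [List.filter_cons_of_neg (by simp [h3])]
            rw [List.filter_cons_of_pos (by simp [h4])]
            rw [pv_min?_cons_of_le _ _ (by intro y hy; have hm := List.mem_of_mem_filter hy; fin_cases hm <;> decide)]
            rfl
        · simp only [h0, h1, h2, h3, decide_true, decide_false, Bool.not_true, Bool.not_false, Bool.false_eq_true, if_true, if_false, ite_true, ite_false]
          rw [List.filter_cons_of_neg (by simp [h0])]
          rw [List.filter_cons_of_neg (by simp [h1])]
          rw [List.filter_cons_of_neg (by simp [h2])]
          rw [List.filter_cons_of_pos (by simp [h3])]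
          rw [pv_min?_cons_of_le _ _ (by intro y hy; have hm := List.mem_of_mem_filter hy; fin_cases hm <;> decide)]
          rfl
      · simp only [h0, h1, h2, decide_true, decide_false, Bool.not_true, Bool.not_false, Bool.false_eq_true, if_true, if_false, ite_true, ite_false]
        rw [List.filter_cons_of_neg (by simp [h0])]
        rw [List.filter_cons_of_neg (by simp [h1])]
        rw [List.filter_cons_of_pos (by simp [h2])]
        rw [pv_min?_cons_of_le _ _ (by intro y hy; have hm := List.mem_of_mem_filter hy; fin_cases hm <;> decide)]
        rfl
    · simp only [h0, h1, decide_true, decide_false, Bool.not_true, Bool.not_false, Bool.false_eq_true, if_true, if_false, ite_true, ite_false]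
      rw [List.filter_cons_of_neg (by simp [h0])]
      rw [List.filter_cons_of_pos (by simp [h1])]
      rw [pv_min?_cons_of_le _ _ (by intro y hy; have hm := List.mem_of_mem_filter hy; fin_cases hm <;> decide)]
      rfl
  · simp only [h0, decide_true, decide_false, Bool.not_true, Bool.not_false, Bool.false_eq_true, if_true, if_false, ite_true, ite_false]
    rw [List.filter_cons_of_pos (by simp [h0])]
    rw [pv_min?_cons_of_le _ _ (by intro y hy; have hm := List.mem_of_mem_filter hy; fin_cases hm <;> decide)]
    rfl
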